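-- pv_equiv track=rewrite | github.com/pypi-data/pypi-mirror-189 | packages/dagsim/dagsim-1.0.9-py3-none-any.whl/dagsim/utils/base_utils.py | get_args_str
-- ===== SOURCE A (Python) =====
-- def get_args_str(doc_string, n):
--     start = doc_string.find("(")
--     end = doc_string.find(",")
--     while end >= 0 and n > 1:
--         end = doc_string.find(",", end + 1)
--         n -= 1
--     if end == -1:
--         end = doc_string.find(")")
--     return doc_string[start + 1:end]
-- ===== SOURCE B (Python) =====
-- def get_args_str(doc_string, n):
--     commas = [i for i, c in enumerate(doc_string) if c == ","]
--     m = n if n > 1 else 1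
--     end = commas[m - 1] if len(commas) >= m else doc_string.find(")")
--     return doc_string[doc_string.find("(") + 1:end]
-- ===== Notes on version B (the rewrite author's own statement) =====
-- stated objective: alternative
-- what changed: A lazily re-scans with repeated str.find(',', end+1) in a while loop; B makes one eager enumerate pass building the list of all comma positions and looks the n-th one up directly (falling back to find(')') when there are fewer than n commas).
import Mathlib
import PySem

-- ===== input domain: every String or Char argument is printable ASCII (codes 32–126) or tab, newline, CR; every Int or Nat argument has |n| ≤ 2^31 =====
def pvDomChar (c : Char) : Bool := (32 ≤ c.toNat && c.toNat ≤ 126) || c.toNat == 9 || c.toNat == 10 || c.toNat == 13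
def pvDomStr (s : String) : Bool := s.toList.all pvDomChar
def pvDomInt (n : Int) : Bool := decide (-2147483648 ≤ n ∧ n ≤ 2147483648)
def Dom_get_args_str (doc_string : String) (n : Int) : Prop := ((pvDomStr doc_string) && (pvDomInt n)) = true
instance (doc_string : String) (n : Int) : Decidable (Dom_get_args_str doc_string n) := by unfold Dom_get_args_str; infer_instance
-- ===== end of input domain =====

-- B replaces A's lazy repeated str.find(',') scanning loop by one eager pass that
-- indexes all comma positions, then looks the n-th one up directly (objective: alternative).


-- ===== PORT A =====
-- the while loop: while end >= 0 and n > 1: end = doc_string.find(",", end + 1); n -= 1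
def aFindLoop (s : String) (e : Int) (n : Int) : Int :=
  if h : 0 ≤ e ∧ 1 < n then
    aFindLoop s (PySem.Str.findFrom s "," (e + 1) none) (n - 1)
  else e
termination_by n.toNat
decreasing_by omega

def get_args_str (doc_string : String) (n : Int) : String :=
  let start := PySem.Str.find doc_string "("
  let e0 := PySem.Str.find doc_string ","
  let e1 := aFindLoop doc_string e0 n
  let e2 := if e1 = -1 then PySem.Str.find doc_string ")" else e1
  PySem.Str.slice doc_string (some (start + 1)) (some e2)

-- ===== PORT B =====
def get_args_str_alt (doc_string : String) (n : Int) : String :=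
  let commas := ((PySem.List.enumerate doc_string.toList 0).filter (fun p => p.2 == ',')).map (·.1)
  let m := if 1 < n then n else 1
  let e := if m ≤ (commas.length : Int) then commas.getD (m - 1).toNat 0
           else PySem.Str.find doc_string ")"
  PySem.Str.slice doc_string (some (PySem.Str.find doc_string "(" + 1)) (some e)

-- ===== PRECONDITION & SPEC =====
def Spec_get_args_str (doc_string : String) (n : Int) (out : String) : Prop := out = get_args_str_alt doc_string n
instance (doc_string : String) (n : Int) (out : String) : Decidable (Spec_get_args_str doc_string n out) := by unfold Spec_get_args_str; infer_instance

-- ===== CLAIM (what is proved, stated in full; the proofs are below) =====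
def Claim_equal_get_args_str : Prop := ∀ (doc_string : String) (n : Int), Dom_get_args_str doc_string n → Spec_get_args_str doc_string n (get_args_str doc_string n)

-- ===== LEMMAS AND PROOFS =====

-- proof-side list of comma positions, starting offset s
def commaIdx : List Char → Nat → List Nat
  | [], _ => []
  | c :: t, s => if c = ',' then s :: commaIdx t (s + 1) else commaIdx t (s + 1)

-- head-of-possibly-empty list as Python's find result
def hf (cl : List Nat) : Int := match cl.head? with | some i => (i : Int) | none => -1

theorem ci_shift (l : List Char) : ∀ (a b : Nat), commaIdx l (a + b) = (commaIdx l a).map (· + b) := by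
  induction l with
  | nil => intro a b; simp [commaIdx]
  | cons c t ih =>
    intro a b
    by_cases h : c = ',' <;>
      simp [commaIdx, h, show a + b + 1 = (a + 1) + b by omega, ih (a + 1) b]

theorem ci_empty_iff (l : List Char) : ∀ s, commaIdx l s = [] ↔ ',' ∉ l := by
  induction l with
  | nil => simp [commaIdx]
  | cons c t ih =>
    intro s
    by_cases h : c = ','
    · simp [commaIdx, h]
    · rw [commaIdx, if_neg h, ih (s + 1)]
      simp only [List.mem_cons, not_or]
      constructor
      · exact fun h1 => ⟨fun e => h e.symm, h1⟩
      · exact fun h1 => h1.2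

theorem ci_head (l : List Char) : ∀ (s i : Nat) (rest : List Nat),
    commaIdx l s = i :: rest →
    ∃ k, i = s + k ∧ l[k]? = some ',' ∧ ∀ k' < k, l[k']? ≠ some ',' := by
  induction l with
  | nil => intro s i rest h; simp [commaIdx] at h
  | cons c t ih =>
    intro s i rest h
    by_cases hc : c = ','
    · simp [commaIdx, hc] at h
      exact ⟨0, by omega, by simp [hc], by omega⟩
    · simp [commaIdx, hc] at h
      obtain ⟨k, hk, hget, hmin⟩ := ih (s + 1) i rest h
      refine ⟨k + 1, by omega, by simpa using hget, ?_⟩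
      intro k' hk'
      cases k' with
      | zero => simpa using hc
      | succ k'' => simpa using hmin k'' (by omega)

-- a singleton is a prefix iff it is the head
theorem singleton_prefix_iff (c : Char) (xs : List Char) : [c] <+: xs ↔ xs[0]? = some c := by
  cases xs with
  | nil => simp
  | cons x t => simp [List.cons_prefix_cons, eq_comm]

theorem singleton_infix_iff (c : Char) (xs : List Char) : [c] <:+: xs ↔ c ∈ xs := by
  constructor
  · rintro ⟨p, q, rfl⟩; simp
  · intro h
    obtain ⟨p, q, rfl⟩ := List.append_of_mem h
    exact ⟨p, q, by simp⟩

-- find on a char: the head of commaIdx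
theorem find_eq_hf (l : List Char) : PySem.Chars.find l [','] = hf (commaIdx l 0) := by
  by_cases h : PySem.Chars.find l [','] = -1
  · rw [h]
    rw [PySem.Chars.find_eq_neg_one_iff, singleton_infix_iff] at h
    have : commaIdx l 0 = [] := (ci_empty_iff l 0).mpr h
    simp [hf, this]
  · have hnn : 0 ≤ PySem.Chars.find l [','] := by
      have := PySem.Chars.neg_one_le_find l [',']; omega
    obtain ⟨hpre, hmin⟩ := PySem.Chars.find_spec (s := l) (sub := [',']) hnn
    rw [singleton_prefix_iff] at hpre
    rw [List.getElem?_drop] at hpre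
    simp only [Nat.add_zero] at hpre
    cases hci : commaIdx l 0 with
    | nil =>
      exfalso
      have : ',' ∉ l := (ci_empty_iff l 0).mp hci
      exact this (List.mem_of_getElem? hpre)
    | cons i rest =>
      obtain ⟨k, hk, hget, hkmin⟩ := ci_head l 0 i rest hci
      have hk1 : i = k := by omega
      subst hk1
      -- k = (find).toNat
      have h1 : ¬ ((PySem.Chars.find l [',']).toNat < i) := by
        intro hlt
        exact hkmin _ hlt hpre
      have h2 : ¬ (i < (PySem.Chars.find l [',']).toNat) := by
        intro hlt
        apply hmin i hlt
        rw [singleton_prefix_iff, List.getElem?_drop]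
        simpa using hget
      have : (PySem.Chars.find l [',']).toNat = i := by omega
      simp [hf, ← this, Int.toNat_of_nonneg hnn]

-- findFrom from j: head of the comma positions at index ≥ j
theorem findFrom_eq_hf (l : List Char) (j : Nat) (hj : j ≤ l.length) :
    PySem.Chars.findFrom l [','] (j : Int) none = hf (commaIdx (l.drop j) j) := by
  rw [PySem.Chars.findFrom_natCast l [','] j hj, find_eq_hf]
  have hshift : commaIdx (l.drop j) j = (commaIdx (l.drop j) 0).map (· + j) := by
    simpa using ci_shift (l.drop j) 0 j
  cases hci : commaIdx (l.drop j) 0 with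
  | nil => simp [hf, hshift, hci]
  | cons i rest => simp [hf, hshift, hci]; omega

-- stepping: if the first comma at index ≥ j is i, the list restarted past i is the tail
theorem ci_step (l : List Char) : ∀ (d j : Nat) (i : Nat) (rest : List Nat),
    l.length - j ≤ d → j ≤ l.length → commaIdx (l.drop j) j = i :: rest →
    i < l.length ∧ commaIdx (l.drop (i + 1)) (i + 1) = rest := by
  intro d
  induction d with
  | zero =>
    intro j i rest hd hj h
    have : l.drop j = [] := by
      apply List.eq_nil_of_length_eq_zero; simp; omega
    simp [this, commaIdx] at h
  | succ d ih =>
    intro j i rest hd hj h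
    rcases Nat.lt_or_ge j l.length with hlt | hge
    · have hdrop : l.drop j = l[j] :: l.drop (j + 1) := by
        rw [List.drop_eq_getElem_cons hlt]
      by_cases hc : l[j] = ','
      · rw [hdrop] at h
        simp [commaIdx, hc] at h
        obtain ⟨rfl, hrest⟩ := h
        exact ⟨hlt, hrest⟩
      · rw [hdrop] at h
        simp [commaIdx, hc] at h
        exact ih (j + 1) i rest (by omega) (by omega) h
    · have : l.drop j = [] := by
        apply List.eq_nil_of_length_eq_zero; simp; omega
      simp [this, commaIdx] at h

-- values in commaIdx (l.drop j) j are < l.length needed above; and the loop invariant: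
theorem loop_hf (s : String) : ∀ (N : Nat) (n : Int) (j : Nat),
    n.toNat ≤ N → j ≤ s.toList.length →
    aFindLoop s (hf (commaIdx (s.toList.drop j) j)) n
      = hf ((commaIdx (s.toList.drop j) j).drop (n - 1).toNat) := by
  intro N
  induction N with
  | zero =>
    intro n j hN hj
    -- n.toNat = 0 means n ≤ 0, loop exits immediately
    have hn : ¬ 1 < n := by omega
    rw [aFindLoop, dif_neg (fun h => hn h.2)]
    have : (n - 1).toNat = 0 := by omega
    rw [this, List.drop_zero]
  | succ N ih =>
    intro n j hN hj
    cases hci : commaIdx (s.toList.drop j) j with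
    | nil =>
      rw [aFindLoop, dif_neg (by simp [hf])]
      simp [hf]
    | cons i rest =>
      by_cases hn : 1 < n
      · obtain ⟨hilt, hstep⟩ := ci_step s.toList (s.toList.length - j) j i rest (le_refl _) hj hci
        have he : hf (i :: rest) = (i : Int) := rfl
        rw [he, aFindLoop, dif_pos ⟨by positivity, hn⟩]
        have hcast : (i : Int) + 1 = ((i + 1 : Nat) : Int) := by push_cast; ring
        rw [PySem.Str.findFrom_eq, show (",").toList = [','] from rfl, hcast,
            findFrom_eq_hf s.toList (i + 1) (by omega), hstep]
        have := ih (n - 1) (i + 1) (by omega) (by omega)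
        rw [hstep] at this
        rw [this]
        have hnn : (n - 1).toNat = (n - 1 - 1).toNat + 1 := by omega
        rw [hnn, List.drop_succ_cons]
      · have he : hf (i :: rest) = (i : Int) := rfl
        rw [he, aFindLoop, dif_neg (fun h => hn h.2)]
        have : (n - 1).toNat = 0 := by omega
        rw [this, List.drop_zero, he]

-- B's eager comma list is the proof-side commaIdx
theorem enum_filter_eq (l : List Char) : ∀ (a : Nat),
    ((PySem.List.enumerate l (a : Int)).filter (fun p => p.2 == ',')).map (·.1)
      = (commaIdx l a).map Int.ofNat := by
  induction l with
  | nil => intro a; simp [PySem.List.enumerate_nil, commaIdx]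
  | cons c t ih =>
    intro a
    rw [PySem.List.enumerate_cons]
    have hc1 : ((a : Int) + 1) = ((a + 1 : Nat) : Int) := by push_cast; ring
    by_cases hc : c = ','
    · rw [List.filter_cons_of_pos (by simp [hc]), List.map_cons, hc1, ih (a + 1),
          commaIdx, if_pos hc, List.map_cons]
      rfl
    · rw [List.filter_cons_of_neg (by simp [hc]), hc1, ih (a + 1),
          commaIdx, if_neg hc]

-- ===== VERDICT (by name: the statement is the Claim_ definition above) =====
theorem get_args_str_spec : Claim_equal_get_args_str := by
  intro s n _
  unfold Spec_get_args_str
  simp only [get_args_str, get_args_str_alt]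
  have hfind : PySem.Str.find s "," = hf (commaIdx s.toList 0) := by
    rw [PySem.Str.find_eq, show (",").toList = [','] from rfl]
    exact find_eq_hf s.toList
  have hloop := loop_hf s n.toNat n 0 (le_refl _) (Nat.zero_le _)
  simp only [List.drop_zero] at hloop
  have hB : ((PySem.List.enumerate s.toList 0).filter (fun p => p.2 == ',')).map (·.1)
      = (commaIdx s.toList 0).map Int.ofNat := by
    have h := enum_filter_eq s.toList 0
    rwa [Nat.cast_zero] at h
  rw [hfind, hloop, hB]
  set C := commaIdx s.toList 0 with hC
  set m : Int := if 1 < n then n else 1 with hm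
  have hmn : (m - 1).toNat = (n - 1).toNat := by
    rw [hm]; by_cases h : 1 < n
    · rw [if_pos h]
    · rw [if_neg h]; omega
  have hm1 : 1 ≤ m := by
    rw [hm]; by_cases h : 1 < n
    · rw [if_pos h]; omega
    · rw [if_neg h]
  have hend : (if hf (C.drop (n - 1).toNat) = -1 then PySem.Str.find s ")"
                else hf (C.drop (n - 1).toNat))
      = (if m ≤ (((C.map Int.ofNat).length : Nat) : Int)
          then (C.map Int.ofNat).getD (m - 1).toNat 0
          else PySem.Str.find s ")") := by
    cases hd : C.drop (n - 1).toNat with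
    | nil =>
      have hlen : C.length ≤ (n - 1).toNat := by
        have h := congrArg List.length hd
        rw [List.length_drop] at h
        simp at h
        omega
      rw [if_pos (by simp [hf]), if_neg (by rw [List.length_map]; omega)]
    | cons i rest =>
      have hlt : (n - 1).toNat < C.length := by
        have h := congrArg List.length hd
        rw [List.length_drop, List.length_cons] at h
        omega
      have hgetd : (C.map Int.ofNat).getD (m - 1).toNat 0 = (i : Int) := by
        rw [List.getD_eq_getElem?_getD, List.getElem?_map, hmn]
        have hC' : C[(n - 1).toNat]? = some i := by
          rw [← List.head?_drop, hd]; rfl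
        rw [hC']; rfl
      rw [if_neg (by simp [hf]), if_pos (by rw [List.length_map]; omega), hgetd]
      rfl
  rw [hend]
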